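-- pv_equiv track=rewrite | github.com/kejsiStruga/pythonProject | coding_challenges/single_number_problem.py | single_nr_problem
-- ===== SOURCE A (Python) =====
-- def single_nr_problem(arr):
--     d = dict()
--
--     for i in range(len(arr)):
--         if arr[i] in d.keys():
--             d[arr[i]] += 1
--         else:
--             d[arr[i]] = 1
--
--     for key in d:
--         if d.get(key) <= 1:
--             return key
-- ===== SOURCE B (Python) =====
-- def single_nr_problem(arr):
--     for x in arr:
--         if arr.count(x) == 1:
--             return x
-- ===== Notes on version B (the rewrite author's own statement) =====
-- stated objective: simpler
-- what changed: Drops the counting dict entirely: B scans arr in order and returns the first element x with arr.count(x) == 1, replacing build-count-table-then-scan-keys with a direct first-unique scan.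
-- outside the precondition, e.g. on single_nr_problem([1, 1]): A returns None, B returns None
import Mathlib
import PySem

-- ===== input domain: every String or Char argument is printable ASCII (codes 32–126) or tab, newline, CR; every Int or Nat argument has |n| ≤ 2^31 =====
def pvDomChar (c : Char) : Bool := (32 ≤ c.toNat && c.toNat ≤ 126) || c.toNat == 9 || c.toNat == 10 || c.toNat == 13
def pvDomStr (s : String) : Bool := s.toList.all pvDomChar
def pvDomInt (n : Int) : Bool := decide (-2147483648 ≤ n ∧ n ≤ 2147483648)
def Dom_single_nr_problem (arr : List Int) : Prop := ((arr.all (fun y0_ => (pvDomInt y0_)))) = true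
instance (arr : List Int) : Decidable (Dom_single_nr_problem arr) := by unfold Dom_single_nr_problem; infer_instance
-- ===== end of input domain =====

-- B drops A's counting dict and simply returns the first element x of arr with arr.count(x) == 1 (simpler, not faster).

-- ===== PORT A =====
def single_nr_problem (arr : List Int) : Int :=
  let d : PySem.Dict Int Int :=
    (PySem.List.pyRange 0 (PySem.List.len arr) 1).foldl
      (fun d i =>
        if d.contains (PySem.List.pyGetD arr i 0) then
          d.insert (PySem.List.pyGetD arr i 0) (d.getD (PySem.List.pyGetD arr i 0) 0 + 1)
        else
          d.insert (PySem.List.pyGetD arr i 0) 1)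
      PySem.Dict.empty
  -- the second loop: first key with d.get(key) <= 1; Python returns None if none exists
  -- (excluded by Pre_single_nr_problem), so the fall-through value 0 is never claimed about.
  (d.keys.find? (fun k => decide (d.getD k 0 ≤ 1))).getD 0

-- ===== PORT B =====
def single_nr_problem_alt (arr : List Int) : Int :=
  (arr.find? (fun x => arr.count x == 1)).getD 0

-- ===== PRECONDITION & SPEC =====
-- Pre_ excludes exactly the inputs where no element occurs exactly once: there the Python A
-- (and B) falls off the loop and returns None, which is not an Int.
def Pre_single_nr_problem (arr : List Int) : Prop := ∃ x ∈ arr, arr.count x = 1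
instance (arr : List Int) : Decidable (Pre_single_nr_problem arr) := by
  unfold Pre_single_nr_problem; infer_instance

def pvWitness_single_nr_problem : List Int := [2, 2, 5]

def Spec_single_nr_problem (arr : List Int) (out : Int) : Prop := out = single_nr_problem_alt arr
instance (arr : List Int) (out : Int) : Decidable (Spec_single_nr_problem arr out) := by
  unfold Spec_single_nr_problem; infer_instance

-- ===== CLAIM (what is proved, stated in full; the proofs are below) =====
def Claim_equal_single_nr_problem : Prop := ∀ (arr : List Int), Dom_single_nr_problem arr → Pre_single_nr_problem arr → Spec_single_nr_problem arr (single_nr_problem arr)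

-- ===== LEMMAS AND PROOFS =====

-- find? only looks at the value of the predicate on the list's members
theorem pv_find?_congr {α : Type} (l : List α) (p q : α → Bool)
    (h : ∀ x ∈ l, p x = q x) : l.find? p = l.find? q := by
  induction l with
  | nil => rfl
  | cons a t ih =>
    simp only [List.find?_cons]
    rw [h a (List.mem_cons_self)]
    cases q a
    · exact ih (fun x hx => h x (List.mem_cons_of_mem _ hx))
    · rfl

-- find? over a fold of Set.add: first match in the accumulator, else first fresh match in l
theorem pv_find?_foldl_add {α : Type} [DecidableEq α] (p : α → Bool) :
    ∀ (l s : List α),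
      (l.foldl PySem.Set.add s).find? p
        = (s.find? p).or (l.find? (fun x => p x && !s.contains x)) := by
  intro l
  induction l with
  | nil => intro s; simp
  | cons a t ih =>
    intro s
    simp only [List.foldl_cons, List.find?_cons]
    by_cases hmem : a ∈ s
    · have hadd : PySem.Set.add s a = s := by
        simp [PySem.Set.add, PySem.Set.contains, hmem]
      rw [hadd, ih s]
      simp [hmem]
    · have hadd : PySem.Set.add s a = s ++ [a] := by
        simp [PySem.Set.add, PySem.Set.contains, hmem]
      have hc : s.contains a = false := by simpa using hmem
      rw [hadd, ih (s ++ [a])]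
      by_cases hpa : p a
      · cases hfs : List.find? p s <;>
          simp [List.find?_append, hpa, hmem, hfs]
      · simp only [hpa, Bool.false_and]
        rw [List.find?_append]
        have h1 : List.find? p [a] = none := by simp [hpa]
        rw [h1]
        simp only [Option.or_none]
        congr 1
        apply pv_find?_congr
        intro x hx
        by_cases hxa : x = a
        · subst hxa; simp [hpa]
        · simp [hxa]

-- first match among the distinct elements (first-insertion order) = first match in the list
theorem pv_find?_ofList {α : Type} [DecidableEq α] (p : α → Bool) (l : List α) :
    (PySem.Set.ofList l).find? p = l.find? p := by
  rw [PySem.Set.ofList_eq_foldl, pv_find?_foldl_add]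
  simp only [List.find?_nil, Option.none_or]
  apply pv_find?_congr
  intro x hx
  simp

-- A's first (index) loop builds Counter(arr)
theorem pv_loopA_eq_counter (arr : List Int) :
    (PySem.List.pyRange 0 (PySem.List.len arr) 1).foldl
      (fun (d : PySem.Dict Int Int) i =>
        if d.contains (PySem.List.pyGetD arr i 0) then
          d.insert (PySem.List.pyGetD arr i 0) (d.getD (PySem.List.pyGetD arr i 0) 0 + 1)
        else
          d.insert (PySem.List.pyGetD arr i 0) 1)
      PySem.Dict.empty = PySem.Dict.counter arr := by
  rw [PySem.List.foldl_pyRange_zero_pyGetD arr 0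
    (fun (d : PySem.Dict Int Int) x =>
      if d.contains x then d.insert x (d.getD x 0 + 1) else d.insert x 1) PySem.Dict.empty]
  have hcongr : ∀ (d : PySem.Dict Int Int) (x : Int), x ∈ arr →
      (fun (d : PySem.Dict Int Int) x =>
        if d.contains x then d.insert x (d.getD x 0 + 1) else d.insert x 1) d x
      = (fun (d : PySem.Dict Int Int) x => d.insert x (d.getD x 0 + 1)) d x := by
    intro d x _
    by_cases h : d.contains x
    · simp [h]
    · have hc : d.contains x = false := by simpa using h
      simp [hc, PySem.Dict.getD_of_not_contains]
  exact Eq.trans (PySem.List.foldl_congr_mem arr _ _ PySem.Dict.empty hcongr)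
    (PySem.Dict.foldl_insert_getD_add_one_eq_counter arr)

-- ===== VERDICT (by name: the statement is the Claim_ definition above) =====
theorem single_nr_problem_spec : Claim_equal_single_nr_problem := by
  intro arr _ _
  unfold Spec_single_nr_problem single_nr_problem single_nr_problem_alt
  simp only [pv_loopA_eq_counter, PySem.Dict.keys_counter]
  congr 1
  rw [pv_find?_congr (PySem.Set.ofList arr)
        (fun k => decide ((PySem.Dict.counter arr).getD k 0 ≤ 1))
        (fun x => arr.count x == 1)
        (by
          intro x hx
          simp only [PySem.Dict.getD_counter]
          have hmem : x ∈ arr := (PySem.Set.mem_ofList arr x).1 hx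
          have hpos : 0 < arr.count x := List.count_pos_iff.2 hmem
          by_cases h1 : arr.count x = 1
          · simp [h1]
          · have h2 : ¬ ((arr.count x : Int) ≤ 1) := by omega
            simp [h1, h2])]
  exact pv_find?_ofList _ arr
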